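-- pv_equiv track=rewrite | github.com/the16stpythonist/JTrojanShell | JTShell/processers/executer.py | _get_innerbracket
-- ===== SOURCE A (Python) =====
-- def _get_innerbracket(tokenlist):
--     """
--     when passed the tokenlist of the command to be executed, this method will simply return the sub-tokenlist of the
--     most inner bracket (without the actual bracket tokens), so that this can be easily processed further
--     :param tokenlist: (list) the full token list of the issued command
--     :return: (list) the sub tokenlist of the most inner bracket
--     """
--     # as the tokenlist has passed through the analyzer without issueing a exception at this point, any potential
--     # errors or input mistakes can be left unhandled
--     sub_list = []
--     # firstly itering through the whole list, mapping the index of the most inner opening bracket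
--     current_layer = 0
--     index = 0
--     layer_innerbracket = 0
--     index_innerbracket = 0
--     for token in tokenlist:
--         # updating the layer of brackets
--         if token == "(":
--             current_layer += 1
--         elif token == ")":
--             current_layer -= 1
--         # updating the index of the inner bracket, by checking if the current layer is deeper than the inner bracket
--         if current_layer > layer_innerbracket:
--             layer_innerbracket = current_layer
--             index_innerbracket = index
--         index += 1
--     # now returning
--     for i in range(index_innerbracket + 1, len(tokenlist)):
--         if tokenlist[i] == ")":
--             break
--         else:
--             sub_list.append(tokenlist[i])
--     return sub_list
-- ===== SOURCE B (Python) =====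
-- def _get_innerbracket(tokenlist):
--     # depth profile after each token, then argmax (first attainment), then slice to first ")"
--     depths = []
--     d = 0
--     for t in tokenlist:
--         d += 1 if t == "(" else -1 if t == ")" else 0
--         depths.append(d)
--     peak = max(depths, default=0)
--     idx = depths.index(peak) if peak > 0 else 0
--     tail = tokenlist[idx + 1:]
--     return tail[:tail.index(")")] if ")" in tail else tail
-- ===== Notes on version B (the rewrite author's own statement) =====
-- stated objective: idiomatic
-- what changed: B replaces A's four-variable record-tracking loop and index-driven break loop with a depth-profile list, max/index argmax, and a slice up to the first ')'.
import Mathlib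
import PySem

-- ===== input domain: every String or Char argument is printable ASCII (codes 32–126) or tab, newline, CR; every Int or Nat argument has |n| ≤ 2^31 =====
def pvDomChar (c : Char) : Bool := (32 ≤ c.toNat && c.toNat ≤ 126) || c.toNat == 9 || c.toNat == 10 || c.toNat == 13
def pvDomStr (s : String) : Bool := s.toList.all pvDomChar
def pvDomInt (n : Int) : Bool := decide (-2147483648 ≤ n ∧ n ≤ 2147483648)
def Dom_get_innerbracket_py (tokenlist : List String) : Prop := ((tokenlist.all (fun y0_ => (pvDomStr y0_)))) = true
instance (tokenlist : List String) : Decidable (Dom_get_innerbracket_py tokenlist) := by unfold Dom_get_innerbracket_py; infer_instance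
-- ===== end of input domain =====

-- B replaces A's record-tracking loop (current_layer/layer_innerbracket/index_innerbracket) and its
-- index-with-break collection loop by a depth-profile list, max + index (argmax), and a slice up to
-- the first ")": a more idiomatic decomposition, same O(n) cost.

-- ===== PORT A =====
-- A's first loop: state (current_layer, index, layer_innerbracket, index_innerbracket); returns the
-- final (layer_innerbracket, index_innerbracket). Python indices here are always non-negative, kept as Nat.
def aLoop : List String → Int → Nat → Int → Nat → Int × Nat
  | [], _, _, li, ii => (li, ii)
  | t :: ts, cl, idx, li, ii =>
    let cl' := if t = "(" then cl + 1 else if t = ")" then cl - 1 else cl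
    if cl' > li then aLoop ts cl' (idx + 1) cl' idx
    else aLoop ts cl' (idx + 1) li ii

-- A's second loop: for i in range(index_innerbracket + 1, len(tokenlist)): break on ")", else append.
def aCollect (tl : List String) (i : Nat) : List String :=
  if h : i < tl.length then
    if tl[i] = ")" then [] else tl[i] :: aCollect tl (i + 1)
  else []
termination_by tl.length - i

def get_innerbracket_py (tokenlist : List String) : List String :=
  let r := aLoop tokenlist 0 0 0 0
  aCollect tokenlist (r.2 + 1)

-- ===== PORT B =====
-- running-depth profile: depths[i] = bracket depth after token i
def depthsOf : List String → Int → List Int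
  | [], _ => []
  | t :: ts, d =>
    let d' := d + (if t = "(" then 1 else if t = ")" then (-1) else 0)
    d' :: depthsOf ts d'

def get_innerbracket_py_alt (tokenlist : List String) : List String :=
  let depths := depthsOf tokenlist 0
  let peak := (PySem.List.max? depths (fun y => y)).getD 0    -- max(depths, default=0)
  -- depths.index(peak): peak ∈ depths whenever peak > 0, so the none branch is unreachable
  let idx : Nat := if peak > 0 then (PySem.List.index? depths peak).getD 0 else 0
  let tail := tokenlist.drop (idx + 1)                        -- tokenlist[idx+1:]
  match PySem.List.index? tail ")" with                       -- tail[:tail.index(")")] if ")" in tail else tail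
  | some j => tail.take j
  | none => tail

-- ===== PRECONDITION & SPEC =====
def Spec_get_innerbracket_py (tokenlist : List String) (out : List String) : Prop := out = get_innerbracket_py_alt tokenlist
instance (tokenlist : List String) (out : List String) : Decidable (Spec_get_innerbracket_py tokenlist out) := by unfold Spec_get_innerbracket_py; infer_instance

-- ===== CLAIM (what is proved, stated in full; the proofs are below) =====
def Claim_equal_get_innerbracket_py : Prop := ∀ (tokenlist : List String), Dom_get_innerbracket_py tokenlist → Spec_get_innerbracket_py tokenlist (get_innerbracket_py tokenlist)

-- ===== LEMMAS AND PROOFS =====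

theorem foldl_max_assoc (r : List Int) : ∀ (a b : Int), r.foldl max (max a b) = max a (r.foldl max b) := by
  induction r with
  | nil => intro a b; simp [List.foldl]
  | cons c r ih =>
    intro a b
    simp only [List.foldl]
    rw [max_assoc, ih]

theorem le_foldl_max_init (r : List Int) (a : Int) : a ≤ r.foldl max a := by
  induction r generalizing a with
  | nil => simp [List.foldl]
  | cons c r ih =>
    simp only [List.foldl]
    exact le_trans (le_max_left a c) (ih _)

theorem idxOf_cons_ne' (x v : Int) (l : List Int) (h : x ≠ v) :
    List.idxOf v (x :: l) = List.idxOf v l + 1 := by simp [h]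

theorem idxOf_cons_self' (x : Int) (l : List Int) : List.idxOf x (x :: l) = 0 := by simp

-- characterisation of A's first loop via the depth profile
theorem aLoop_spec (ts : List String) : ∀ (d li : Int) (idx ii : Nat),
    aLoop ts d idx li ii =
      (let l := depthsOf ts d
       let p := l.foldl max li
       if p > li then (p, idx + l.idxOf p) else (li, ii)) := by
  induction ts with
  | nil => intro d li idx ii; simp [aLoop, depthsOf]
  | cons t ts ih =>
    intro d li idx ii
    simp only [aLoop, depthsOf]
    set d' := d + (if t = "(" then 1 else if t = ")" then (-1 : Int) else 0) with hd'
    have harith : (if t = "(" then d + 1 else if t = ")" then d - 1 else d) = d' := by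
      rw [hd']; split_ifs <;> ring
    rw [harith]
    set r := depthsOf ts d' with hr
    set q := r.foldl max d' with hq
    have hdq : d' ≤ q := le_foldl_max_init r d'
    have hfold : (d' :: r).foldl max li = max li q := by
      simp only [List.foldl]
      rw [← foldl_max_assoc]
    by_cases hcase : d' > li
    · rw [if_pos hcase, ih]
      simp only [hfold, ← hr, ← hq]
      have hpq : max li q = q := max_eq_right (le_trans (le_of_lt hcase) hdq)
      rw [hpq]
      have hql : q > li := lt_of_lt_of_le hcase hdq
      rw [if_pos hql]
      by_cases hqd : q > d'
      · rw [if_pos hqd, idxOf_cons_ne' d' q r (ne_of_lt hqd)]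
        rw [Prod.mk.injEq]
        exact ⟨rfl, by omega⟩
      · rw [if_neg hqd]
        have hqd' : q = d' := le_antisymm (not_lt.mp hqd) hdq
        rw [hqd', idxOf_cons_self']
        simp
    · rw [if_neg hcase, ih]
      simp only [hfold, ← hr]
      have hld : max li d' = li := max_eq_left (not_lt.mp hcase)
      have hpq : max li q = r.foldl max li := by
        rw [hq, ← foldl_max_assoc, hld]
      rw [hpq]
      by_cases hp : r.foldl max li > li
      · rw [if_pos hp, if_pos hp]
        have hne : d' ≠ r.foldl max li := by
          have := not_lt.mp hcase; omega
        rw [idxOf_cons_ne' d' _ r hne]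
        rw [Prod.mk.injEq]
        exact ⟨rfl, by omega⟩
      · rw [if_neg hp, if_neg hp]

-- A's collection loop is takeWhile (· ≠ ")") of the tail
theorem aCollect_eq_takeWhile (tl : List String) : ∀ (i : Nat),
    aCollect tl i = (tl.drop i).takeWhile (fun t => t ≠ ")") := by
  intro i
  induction h : tl.length - i using Nat.strong_induction_on generalizing i with
  | _ n ih =>
    rw [aCollect]
    by_cases hi : i < tl.length
    · rw [dif_pos hi]
      have hdrop : tl.drop i = tl[i] :: tl.drop (i + 1) := List.drop_eq_getElem_cons hi
      rw [hdrop, List.takeWhile_cons]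
      by_cases hp : tl[i] = ")"
      · simp [hp]
      · simp only [hp, decide_eq_true_eq]
        rw [ih (tl.length - (i + 1)) (by omega) (i + 1) rfl]
        simp [hp]
    · rw [dif_neg hi]
      rw [List.drop_eq_nil_of_le (by omega)]
      simp

-- B's slice-to-first-")" is takeWhile (· ≠ ")")
theorem slice_eq_takeWhile (tail : List String) :
    (match PySem.List.index? tail ")" with
     | some j => tail.take j
     | none => tail) = tail.takeWhile (fun t => t ≠ ")") := by
  induction tail with
  | nil => simp [PySem.List.index?_eq_idxOf?, List.idxOf?]
  | cons x xs ih =>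
    by_cases hx : x = ")"
    · subst hx
      rw [PySem.List.index?_cons_self]
      simp
    · rw [PySem.List.index?_cons_of_ne xs hx, List.takeWhile_cons]
      simp only [hx, decide_not, ne_eq, not_false_eq_true, decide_true]
      cases hidx : PySem.List.index? xs ")" with
      | none =>
        rw [hidx] at ih
        simp only [Option.map_none]
        simpa using ih
      | some j =>
        rw [hidx] at ih
        simp only [Option.map_some, List.take_succ_cons]
        simpa using ih

-- index? agrees with idxOf on members
theorem index?_eq_idxOf_of_mem (l : List Int) (v : Int) (hv : v ∈ l) :
    PySem.List.index? l v = some (l.idxOf v) := by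
  induction l with
  | nil => cases hv
  | cons x xs ih =>
    by_cases hx : x = v
    · subst hx
      rw [PySem.List.index?_cons_self, idxOf_cons_self']
    · rw [PySem.List.index?_cons_of_ne xs hx]
      have hv' : v ∈ xs := by
        cases hv with
        | head => exact absurd rfl hx
        | tail _ h => exact h
      rw [ih hv', idxOf_cons_ne' x v xs hx]
      rfl

-- ===== VERDICT (by name: the statement is the Claim_ definition above) =====
theorem get_innerbracket_py_spec : Claim_equal_get_innerbracket_py := by
  intro tl _
  unfold Spec_get_innerbracket_py get_innerbracket_py get_innerbracket_py_alt
  simp only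
  rw [aLoop_spec]
  simp only
  rw [aCollect_eq_takeWhile, ← slice_eq_takeWhile]
  cases hl : depthsOf tl 0 with
  | nil =>
    rw [(PySem.List.max?_eq_none_iff ([] : List Int) (fun y => y)).mpr rfl]
    simp
  | cons x r =>
    rw [PySem.List.max?_id_cons]
    simp only [Option.getD_some]
    have hfold : (x :: r).foldl max 0 = max 0 (r.foldl max x) := by
      simp only [List.foldl]
      rw [← foldl_max_assoc]
    rw [hfold]
    by_cases hp : r.foldl max x > 0
    · have h1 : max 0 (r.foldl max x) = r.foldl max x := max_eq_right (le_of_lt hp)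
      rw [h1, if_pos hp, if_pos hp]
      have hmem : r.foldl max x ∈ (x :: r) :=
        PySem.List.max?_mem (by rw [PySem.List.max?_id_cons])
      rw [index?_eq_idxOf_of_mem _ _ hmem]
      simp
    · have h1 : ¬ (max 0 (r.foldl max x) > 0) := by omega
      rw [if_neg h1, if_neg hp]
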